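-- pv_equiv track=rewrite | github.com/Gramdler/goit-python | lesson9/chat_bot.py | sep_text
-- ===== SOURCE A (Python) =====
-- def sep_text(x=''):
--     name = ""
--     number = ""
--     t = x.split(" ")
--     if t:
--         for word in t[1:-1]:
--             name += word + " "
--         number = t[-1]
--     name = name.strip()
--     return name, number
-- ===== SOURCE B (Python) =====
-- def sep_text(x=''):
--     number = x.rpartition(' ')[2]
--     name = x.partition(' ')[2].rpartition(' ')[0].strip()
--     return name, number
-- ===== Notes on version B (the rewrite author's own statement) =====
-- stated objective: idiomatic
-- what changed: Replaces split-into-list, slice and concatenation loop by direct string partitioning: number is everything after the last space (rpartition) and name is the text between the first and last space (partition then rpartition), stripped.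
import Mathlib
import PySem

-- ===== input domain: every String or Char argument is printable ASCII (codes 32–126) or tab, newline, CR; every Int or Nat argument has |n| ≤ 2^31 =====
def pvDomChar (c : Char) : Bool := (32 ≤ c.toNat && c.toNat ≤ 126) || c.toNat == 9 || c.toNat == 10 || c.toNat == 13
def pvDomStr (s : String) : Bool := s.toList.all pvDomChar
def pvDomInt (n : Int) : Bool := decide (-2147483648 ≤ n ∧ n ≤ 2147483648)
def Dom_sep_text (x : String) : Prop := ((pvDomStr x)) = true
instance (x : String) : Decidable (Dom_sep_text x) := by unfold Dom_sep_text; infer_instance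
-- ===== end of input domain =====

-- B replaces A's split-into-list + slice + concatenation loop by direct partitioning at the first and last space (idiomatic; same cost).


-- ===== PORT A =====
def sep_text (x : String) : String × String :=
  let name : List Char := []
  let number : List Char := []
  let t := PySem.Chars.splitOn x.toList [' ']          -- t = x.split(" ")
  let (name, number) :=
    if t ≠ [] then                                     -- `if t:`
      ((PySem.List.slice t (some 1) (some (-1))).foldl -- for word in t[1:-1]: name += word + " "
         (fun acc w => acc ++ (w ++ [' '])) name,
       (PySem.List.pyGet? t (-1)).getD number)         -- number = t[-1]; t ≠ [] in this branch, so pyGet? is some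
    else (name, number)
  let name := PySem.Chars.strip name                   -- name = name.strip()
  (String.ofList name, String.ofList number)

-- ===== PORT B =====
-- x.partition(' ')[2]: text after the first space, empty if no space (exact for the one-char separator ' ')
def pvPartAfter (cs : List Char) : List Char := (cs.dropWhile (· ≠ ' ')).drop 1
-- x.rpartition(' ')[0]: text before the last space, empty if no space (exact for the one-char separator ' ')
def pvRPartBefore (cs : List Char) : List Char := ((cs.reverse.dropWhile (· ≠ ' ')).drop 1).reverse
-- x.rpartition(' ')[2]: text after the last space, the whole string if no space (exact for ' ')
def pvRPartAfter (cs : List Char) : List Char := (cs.reverse.takeWhile (· ≠ ' ')).reverse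

def sep_text_alt (x : String) : String × String :=
  let number := pvRPartAfter x.toList
  let name := PySem.Chars.strip (pvRPartBefore (pvPartAfter x.toList))
  (String.ofList name, String.ofList number)

-- ===== PRECONDITION & SPEC =====
def Spec_sep_text (x : String) (out : String × String) : Prop := out = sep_text_alt x
instance (x : String) (out : String × String) : Decidable (Spec_sep_text x out) := by unfold Spec_sep_text; infer_instance

-- ===== CLAIM (what is proved, stated in full; the proofs are below) =====
def Claim_equal_sep_text : Prop := ∀ (x : String), Dom_sep_text x → Spec_sep_text x (sep_text x)

-- ===== LEMMAS AND PROOFS =====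

-- split on a single space, structurally (proved equal to PySem.Chars.splitOn · [' '] in splitOn_space)
def mySplit : List Char → List (List Char)
  | [] => [[]]
  | c :: r => if c = ' ' then [] :: mySplit r else (mySplit r).modifyHead (c :: ·)

-- join the pieces back with single spaces
def joinSp : List (List Char) → List Char
  | [] => []
  | [w] => w
  | w :: ws => w ++ ' ' :: joinSp ws

theorem modifyHead_id' {α : Type} (l : List α) : l.modifyHead (fun x => x) = l := by
  cases l <;> simp [List.modifyHead]

theorem mySplit_ne_nil (cs : List Char) : mySplit cs ≠ [] := by
  cases cs with
  | nil => simp [mySplit]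
  | cons c r =>
    simp only [mySplit]; split
    · simp
    · cases h : mySplit r with
      | nil => exact absurd h (mySplit_ne_nil r)
      | cons a l => simp [List.modifyHead]

theorem go_spec (fuel : Nat) (l cur : List Char) (acc : List (List Char))
    (h : l.length < fuel) :
    PySem.Chars.splitOn.go [' '] fuel l cur acc
      = acc.reverse ++ (mySplit l).modifyHead (cur.reverse ++ ·) := by
  induction fuel generalizing l cur acc with
  | zero => omega
  | succ f ih =>
    cases l with
    | nil => simp [PySem.Chars.splitOn.go, mySplit, List.modifyHead]
    | cons c rest =>
      by_cases hc : c = ' '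
      · subst hc
        have : PySem.Chars.splitOn.go [' '] (f+1) (' '::rest) cur acc
             = PySem.Chars.splitOn.go [' '] f rest [] (cur.reverse :: acc) := by
          simp [PySem.Chars.splitOn.go, List.isPrefixOf]
        rw [this, ih _ _ _ (by simp at h; omega)]
        simp [mySplit, List.modifyHead]
        cases mySplit rest <;> rfl
      · have : PySem.Chars.splitOn.go [' '] (f+1) (c::rest) cur acc
             = PySem.Chars.splitOn.go [' '] f rest (c :: cur) acc := by
          simp [PySem.Chars.splitOn.go, List.isPrefixOf, Ne.symm hc]
        rw [this, ih _ _ _ (by simp at h; omega)]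
        cases hm : mySplit rest with
        | nil => exact absurd hm (mySplit_ne_nil rest)
        | cons a t => simp [mySplit, hc, hm, List.modifyHead]

theorem splitOn_space (cs : List Char) :
    PySem.Chars.splitOn cs [' '] = mySplit cs := by
  unfold PySem.Chars.splitOn
  rw [go_spec _ _ _ _ (by omega)]
  simp [modifyHead_id']

theorem joinSp_cons (w : List Char) (ws : List (List Char)) (h : ws ≠ []) :
    joinSp (w :: ws) = w ++ ' ' :: joinSp ws := by
  cases ws with
  | nil => exact absurd rfl h
  | cons a t => rfl

theorem joinSp_modifyHead (c : Char) (ws : List (List Char)) (h : ws ≠ []) :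
    joinSp (ws.modifyHead (c :: ·)) = c :: joinSp ws := by
  cases ws with
  | nil => exact absurd rfl h
  | cons a t =>
    cases t with
    | nil => rfl
    | cons b t' => rfl

theorem joinSp_mySplit (cs : List Char) : joinSp (mySplit cs) = cs := by
  induction cs with
  | nil => rfl
  | cons c r ih =>
    by_cases hc : c = ' '
    · subst hc
      rw [show mySplit (' '::r) = [] :: mySplit r from by simp [mySplit]]
      rw [joinSp_cons _ _ (mySplit_ne_nil r), ih]; rfl
    · rw [show mySplit (c::r) = (mySplit r).modifyHead (c :: ·) from by simp [mySplit, hc]]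
      rw [joinSp_modifyHead _ _ (mySplit_ne_nil r), ih]

theorem mem_mySplit_no_space (cs w : List Char) (h : w ∈ mySplit cs) : ' ' ∉ w := by
  induction cs generalizing w with
  | nil => simp_all [mySplit]
  | cons c r ih =>
    by_cases hc : c = ' '
    · subst hc
      rw [show mySplit (' '::r) = [] :: mySplit r from by simp [mySplit]] at h
      rcases List.mem_cons.mp h with h | h
      · simp [h]
      · exact ih _ h
    · rw [show mySplit (c::r) = (mySplit r).modifyHead (c :: ·) from by simp [mySplit, hc]] at h
      cases hm : mySplit r with
      | nil => exact absurd hm (mySplit_ne_nil r)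
      | cons a t =>
        rw [hm] at h
        simp [List.modifyHead] at h
        rcases h with h | h
        · subst h
          intro hmem
          rcases List.mem_cons.mp hmem with h1 | h1
          · exact hc h1.symm
          · exact ih a (hm ▸ List.mem_cons_self) h1
        · exact ih _ (hm ▸ List.mem_cons_of_mem _ h)

theorem partAfter_eq (cs : List Char) :
    pvPartAfter cs = joinSp (mySplit cs).tail := by
  induction cs with
  | nil => rfl
  | cons c r ih =>
    by_cases hc : c = ' '
    · subst hc
      rw [show mySplit (' '::r) = [] :: mySplit r from by simp [mySplit]]
      simp [pvPartAfter, List.dropWhile, joinSp_mySplit]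
    · rw [show mySplit (c::r) = (mySplit r).modifyHead (c :: ·) from by simp [mySplit, hc]]
      cases hm : mySplit r with
      | nil => exact absurd hm (mySplit_ne_nil r)
      | cons a t =>
        simp only [List.modifyHead, List.tail_cons]
        have h2 : pvPartAfter (c :: r) = pvPartAfter r := by
          simp [pvPartAfter, hc]
        rw [h2, ih, hm]
        simp

theorem takeWhile_append_all {α : Type} (p : α → Bool) (xs ys : List α)
    (h : ∀ x ∈ xs, p x = true) :
    (xs ++ ys).takeWhile p = xs ++ ys.takeWhile p := by
  induction xs with
  | nil => simp
  | cons a l ih =>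
    simp only [List.cons_append, List.takeWhile_cons, h a List.mem_cons_self]
    rw [ih (fun x hx => h x (List.mem_cons_of_mem _ hx))]
    simp

theorem takeWhile_append_stop {α : Type} (p : α → Bool) (xs ys : List α)
    (h : ∃ x ∈ xs, p x = false) :
    (xs ++ ys).takeWhile p = xs.takeWhile p := by
  induction xs with
  | nil => simp at h
  | cons a l ih =>
    by_cases ha : p a = true
    · simp only [List.cons_append, List.takeWhile_cons, ha]
      rcases h with ⟨x, hx, hpx⟩
      rcases List.mem_cons.mp hx with rfl | hx
      · rw [ha] at hpx; cases hpx
      · rw [ih ⟨x, hx, hpx⟩]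
    · simp only [List.cons_append, List.takeWhile_cons, eq_false_of_ne_true ha]
      simp

theorem takeWhile_append_last {α : Type} (p : α → Bool) (xs : List α) (y : α)
    (h : p y = false) :
    (xs ++ [y]).takeWhile p = xs.takeWhile p := by
  induction xs with
  | nil => simp [List.takeWhile_cons, h]
  | cons a l ih =>
    by_cases ha : p a = true
    · simp only [List.cons_append, List.takeWhile_cons, ha, ih]
    · simp only [List.cons_append, List.takeWhile_cons, eq_false_of_ne_true ha]
      simp

theorem mySplit_no_space (r : List Char) (h : ' ' ∉ r) : mySplit r = [r] := by
  induction r with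
  | nil => rfl
  | cons c l ih =>
    have hc : c ≠ ' ' := fun hc => h (hc ▸ List.mem_cons_self)
    rw [show mySplit (c::l) = (mySplit l).modifyHead (c :: ·) from by simp [mySplit, hc]]
    rw [ih (fun hm => h (List.mem_cons_of_mem _ hm))]
    rfl

theorem rpartAfter_eq (cs : List Char) :
    pvRPartAfter cs = (mySplit cs).getLastD [] := by
  induction cs with
  | nil => rfl
  | cons c r ih =>
    by_cases hc : c = ' '
    · subst hc
      rw [show mySplit (' '::r) = [] :: mySplit r from by simp [mySplit]]
      have : pvRPartAfter (' '::r) = pvRPartAfter r := by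
        simp only [pvRPartAfter, List.reverse_cons]
        rw [takeWhile_append_last _ _ _ (by simp)]
      rw [this, ih]
      cases hm : mySplit r with
      | nil => exact absurd hm (mySplit_ne_nil r)
      | cons a t => simp
    · by_cases hs : ' ' ∈ r
      · cases hm : mySplit r with
        | nil => exact absurd hm (mySplit_ne_nil r)
        | cons a t =>
          cases t with
          | nil =>
            have hj := joinSp_mySplit r
            rw [hm] at hj
            have har : a = r := hj
            exact absurd hs (har ▸ mem_mySplit_no_space r a (hm ▸ List.mem_cons_self))
          | cons b t' =>
            rw [show mySplit (c::r) = (mySplit r).modifyHead (c :: ·) from by simp [mySplit, hc], hm]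
            have : pvRPartAfter (c::r) = pvRPartAfter r := by
              simp only [pvRPartAfter, List.reverse_cons]
              rw [takeWhile_append_stop _ _ _ ⟨' ', by simp [hs]⟩]
            rw [this, ih, hm]
            simp [List.modifyHead]
      · have hm := mySplit_no_space r hs
        rw [show mySplit (c::r) = (mySplit r).modifyHead (c :: ·) from by simp [mySplit, hc], hm]
        simp only [List.modifyHead, List.getLastD_cons]
        simp only [pvRPartAfter, List.reverse_cons]
        rw [takeWhile_append_all _ _ _ (fun x hx => by
          simp only [decide_eq_true_eq]
          exact fun he => hs (he ▸ List.mem_reverse.mp hx))]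
        simp [hc]

theorem pyGet_neg_one {α : Type} (t : List α) (d : α) (h : t ≠ []) :
    (PySem.List.pyGet? t (-1)).getD d = t.getLastD d := by
  have hn : 1 ≤ t.length := List.length_pos_iff.mpr h
  simp only [PySem.List.pyGet?, PySem.List.pyIdx?]
  rw [if_neg (by omega), if_pos (by push_cast; omega)]
  simp only [Option.bind_some]
  rw [show (-(-1:Int)).toNat = 1 from rfl]
  rw [List.getElem?_eq_getElem (by omega)]
  rw [List.getLastD_eq_getLast?, List.getLast?_eq_getElem?]
  rw [List.getElem?_eq_getElem (by omega)]

theorem slice_one_neg_one {α : Type} (t : List α) :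
    PySem.List.slice t (some 1) (some (-1)) = t.tail.dropLast := by
  cases t with
  | nil => rfl
  | cons a l =>
    simp only [PySem.List.slice, PySem.List.clampIdx]
    norm_num
    rw [List.dropLast_eq_take]
    rw [if_neg (by omega)]

theorem joinSp_concat (ws : List (List Char)) (last : List Char) (h : ws ≠ []) :
    joinSp (ws ++ [last]) = joinSp ws ++ ' ' :: last := by
  induction ws with
  | nil => exact absurd rfl h
  | cons a t ih =>
    cases t with
    | nil => rfl
    | cons b t' =>
      rw [List.cons_append, joinSp_cons _ _ (by simp), joinSp_cons _ _ (by simp), ih (by simp)]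
      simp

theorem rpartBefore_join (ws : List (List Char)) (last : List Char) (h : ' ' ∉ last) :
    pvRPartBefore (joinSp (ws ++ [last])) = joinSp ws := by
  cases ws with
  | nil =>
    simp only [List.nil_append, joinSp, pvRPartBefore]
    rw [List.dropWhile_eq_nil_iff.mpr (fun x hx => by
      simp only [decide_eq_true_eq]
      exact fun he => h (he ▸ List.mem_reverse.mp hx))]
    rfl
  | cons a t =>
    rw [joinSp_concat _ _ (by simp)]
    simp only [pvRPartBefore, List.reverse_append, List.reverse_cons]
    rw [List.append_assoc, List.dropWhile_append]
    rw [List.dropWhile_eq_nil_iff.mpr (fun x hx => by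
      simp only [decide_eq_true_eq]
      exact fun he => h (he ▸ List.mem_reverse.mp hx))]
    simp

theorem strip_append_space (s : List Char) :
    PySem.Chars.strip (s ++ [' ']) = PySem.Chars.strip s := by
  have hr : ∀ u : List Char, PySem.Chars.rstrip (u ++ [' ']) = PySem.Chars.rstrip u := by
    intro u
    simp [PySem.Chars.rstrip, List.dropWhile_cons, PySem.Chars.isspace]
  simp only [PySem.Chars.strip, PySem.Chars.lstrip]
  rw [List.dropWhile_append]
  by_cases he : (s.dropWhile PySem.Chars.isspace).isEmpty
  · rw [if_pos he]
    simp only [List.isEmpty_iff] at he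
    rw [he]
    simp [List.dropWhile_cons, PySem.Chars.isspace, PySem.Chars.rstrip]
  · rw [if_neg he]
    exact hr _

theorem flatMap_space (ws : List (List Char)) (h : ws ≠ []) :
    ws.flatMap (· ++ [' ']) = joinSp ws ++ [' '] := by
  induction ws with
  | nil => exact absurd rfl h
  | cons a t ih =>
    cases t with
    | nil => simp [joinSp]
    | cons b t' =>
      rw [List.flatMap_cons, ih (List.cons_ne_nil _ _), joinSp_cons a (b::t') (List.cons_ne_nil _ _)]
      simp

theorem main_eq (x : String) : sep_text x = sep_text_alt x := by
  simp only [sep_text, sep_text_alt, splitOn_space]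
  rw [if_pos (mySplit_ne_nil x.toList)]
  rw [slice_one_neg_one, pyGet_neg_one _ _ (mySplit_ne_nil x.toList)]
  rw [PySem.List.foldl_append_eq_flatMap]
  rw [partAfter_eq, rpartAfter_eq]
  refine Prod.ext ?_ rfl
  simp only
  congr 1
  rcases List.eq_nil_or_concat (mySplit x.toList).tail with h | ⟨ws, last, h⟩
  · rw [h]; rfl
  · have hlast : ' ' ∉ last :=
      mem_mySplit_no_space x.toList last
        (List.mem_of_mem_tail (h ▸ (by simp : last ∈ ws.concat last)))
    rw [h, List.concat_eq_append, rpartBefore_join _ _ hlast, List.dropLast_concat]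
    cases hw : ws with
    | nil => rfl
    | cons b t' =>
      rw [flatMap_space _ (List.cons_ne_nil _ _), List.nil_append, strip_append_space]

-- ===== VERDICT (by name: the statement is the Claim_ definition above) =====
theorem sep_text_spec : Claim_equal_sep_text := by
  intro x _
  unfold Spec_sep_text
  exact main_eq x
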